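-- pv_equiv track=rewrite | github.com/sixesandsevens/WatchLog-Lite | watchlog_lite/services/ui.py | fold_dupes
-- ===== SOURCE A (Python) =====
-- def fold_dupes(lines):
--     out = []
--     last = None
--     cnt = 0
--     for ln in lines + [None]:
--         if ln == last:
--             cnt += 1
--             continue
--         if last is not None:
--             suf = f' <span class="badge" style="background:#334155;color:#cbd5e1">×{cnt}</span>' if cnt > 1 else ''
--             out.append((last, suf))
--         last, cnt = ln, 1
--     return out
-- ===== SOURCE B (Python) =====
-- def fold_dupes(lines):
--     out = []
--     i = 0
--     n = len(lines)
--     while i < n: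
--         j = i
--         while j < n and lines[j] == lines[i]:
--             j += 1
--         run = j - i
--         suf = f' <span class="badge" style="background:#334155;color:#cbd5e1">×{run}</span>' if run > 1 else ''
--         out.append((lines[i], suf))
--         i = j
--     return out
-- ===== Notes on version B (the rewrite author's own statement) =====
-- stated objective: alternative
-- what changed: Replaces A's sentinel-append ([None]) and carried last/cnt state machine with an index-based run scanner: an inner loop finds the end of each run of equal lines and one pair is emitted per run.
import Mathlib
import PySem

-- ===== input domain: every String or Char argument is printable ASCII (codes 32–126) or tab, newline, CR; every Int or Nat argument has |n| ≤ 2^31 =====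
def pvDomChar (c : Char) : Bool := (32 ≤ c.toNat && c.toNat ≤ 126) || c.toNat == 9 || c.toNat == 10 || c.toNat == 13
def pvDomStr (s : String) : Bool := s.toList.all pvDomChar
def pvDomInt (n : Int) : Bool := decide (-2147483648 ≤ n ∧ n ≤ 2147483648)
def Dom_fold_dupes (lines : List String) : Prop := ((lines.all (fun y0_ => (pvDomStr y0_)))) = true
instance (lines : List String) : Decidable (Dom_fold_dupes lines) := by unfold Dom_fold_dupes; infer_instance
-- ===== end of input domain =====

-- ===== PORT A =====
-- B changes: index/run-scan instead of A's sentinel + last/cnt state machine (objective: alternative).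
def pvBadge (cnt : Int) : String :=
  if cnt > 1 then
    " <span class=\"badge\" style=\"background:#334155;color:#cbd5e1\">\u00d7" ++ PySem.Int.toStr cnt ++ "</span>"
  else ""

-- the for-loop of A, as structural recursion over lines+[None] with state (out, last, cnt)
def pvLoopA : List (Option String) → List (String × String) → Option String → Int → List (String × String)
  | [], out, _, _ => out
  | ln :: rest, out, last, cnt =>
    if ln == last then pvLoopA rest out last (cnt + 1)
    else
      let out' := match last with
        | some l => out ++ [(l, pvBadge cnt)]
        | none => out
      pvLoopA rest out' ln 1

def fold_dupes (lines : List String) : List (String × String) :=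
  pvLoopA (lines.map some ++ [none]) [] none 0

-- ===== PORT B =====
-- Source B's inner while scans the run lines[i:j]; here: takeWhile counts the run, dropWhile jumps to i = j.
def fold_dupes_alt : List String → List (String × String)
  | [] => []
  | x :: xs =>
    let run : Int := 1 + ((xs.takeWhile (· == x)).length : Int)
    (x, pvBadge run) :: fold_dupes_alt (xs.dropWhile (· == x))
termination_by l => l.length
decreasing_by
  simp only [List.length_cons]
  exact Nat.lt_succ_of_le (List.length_dropWhile_le _ _)

-- ===== PRECONDITION & SPEC =====
def Spec_fold_dupes (lines : List String) (out : List (String × String)) : Prop := out = fold_dupes_alt lines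
instance (lines : List String) (out : List (String × String)) : Decidable (Spec_fold_dupes lines out) := by unfold Spec_fold_dupes; infer_instance

-- ===== CLAIM (what is proved, stated in full; the proofs are below) =====
def Claim_equal_fold_dupes : Prop := ∀ (lines : List String), Dom_fold_dupes lines → Spec_fold_dupes lines (fold_dupes lines)

-- ===== LEMMAS AND PROOFS =====

-- ===== VERDICT (by name: the statement is the Claim_ definition above) =====
lemma pvLoopA_run (xs : List String) : ∀ (x : String) (c : Int) (out : List (String × String)),
    pvLoopA (xs.map some ++ [none]) out (some x) c
      = out ++ (x, pvBadge (c + ((xs.takeWhile (· == x)).length : Int))) :: fold_dupes_alt (xs.dropWhile (· == x)) := by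
  induction xs with
  | nil =>
    intro x c out
    simp [pvLoopA, fold_dupes_alt]
  | cons y ys ih =>
    intro x c out
    by_cases h : y = x
    · subst h
      have hb : ((some y : Option String) == some y) = true := by simp
      simp only [List.map_cons, List.cons_append, pvLoopA, hb, if_true]
      rw [ih y (c + 1) out, List.takeWhile_cons, List.dropWhile_cons]
      have he : (y == y) = true := by simp
      simp only [he]
      have harith : c + 1 + ((ys.takeWhile (· == y)).length : Int)
          = c + (((ys.takeWhile (· == y)).length + 1 : Nat) : Int) := by push_cast; ring
      rw [harith]
      simp
    · have hb : ((some y : Option String) == some x) = false := by simp [h]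
      simp only [List.map_cons, List.cons_append, pvLoopA, hb, Bool.false_eq_true, if_false]
      rw [ih y 1 (out ++ [(x, pvBadge c)])]
      have hyx : (y == x) = false := by simp [h]
      rw [List.takeWhile_cons, List.dropWhile_cons]
      simp only [hyx, Bool.false_eq_true, if_false, List.length_nil]
      simp [fold_dupes_alt, List.append_assoc]

theorem fold_dupes_spec : Claim_equal_fold_dupes := by
  intro lines _
  unfold Spec_fold_dupes fold_dupes
  cases lines with
  | nil => simp [pvLoopA, fold_dupes_alt]
  | cons x xs =>
    simp only [List.map_cons, List.cons_append, pvLoopA]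
    rw [show ((some x == (none : Option String)) = false) from rfl]
    simp only [Bool.false_eq_true, if_false]
    rw [pvLoopA_run xs x 1 []]
    simp [fold_dupes_alt]
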